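-- pv_equiv track=rewrite | github.com/nguyenngochuy91/companyQuestions | facebook/onsite/variationDutchFlag.py | rearrangeExtraSpace
-- ===== SOURCE A (Python) =====
-- def rearrangeExtraSpace(arr,low,medium,high):
--     l,m,h = [],[],[]
--     for item in arr:
--         if item<=low:
--             l.append(item)
--         elif item<=medium:
--             m.append(item)
--         else:
--             h.append(item)
--     return l+m+h
-- ===== SOURCE B (Python) =====
-- def rearrangeExtraSpace(arr, low, medium, high):
--     return ([x for x in arr if x <= low]
--             + [x for x in arr if low < x <= medium]
--             + [x for x in arr if low < x and medium < x])
-- ===== Notes on version B (the rewrite author's own statement) =====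
-- stated objective: idiomatic
-- what changed: Replaces the single-pass three-accumulator bucketing loop with three independent filter comprehensions concatenated, with no mutable bucket state.
import Mathlib
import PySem

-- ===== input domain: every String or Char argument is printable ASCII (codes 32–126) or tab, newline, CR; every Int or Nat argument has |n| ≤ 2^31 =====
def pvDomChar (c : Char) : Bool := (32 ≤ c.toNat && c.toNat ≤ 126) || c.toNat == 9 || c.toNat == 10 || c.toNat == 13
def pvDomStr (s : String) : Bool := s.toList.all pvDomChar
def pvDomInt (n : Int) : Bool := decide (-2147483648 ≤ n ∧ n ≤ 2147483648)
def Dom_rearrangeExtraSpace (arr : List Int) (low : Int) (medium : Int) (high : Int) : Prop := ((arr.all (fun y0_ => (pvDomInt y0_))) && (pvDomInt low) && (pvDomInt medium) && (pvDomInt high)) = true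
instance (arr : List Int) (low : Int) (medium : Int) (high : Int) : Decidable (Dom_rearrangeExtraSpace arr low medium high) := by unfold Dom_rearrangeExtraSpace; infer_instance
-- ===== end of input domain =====

-- ===== PORT A =====
-- literal port of A: one pass accumulating the three buckets (l, m, h), then l ++ m ++ h
def rearrangeExtraSpace (arr : List Int) (low : Int) (medium : Int) (high : Int) : List Int :=
  let s := arr.foldl (fun (acc : List Int × List Int × List Int) item =>
    let (l, m, h) := acc
    if item ≤ low then (l ++ [item], m, h)
    else if item ≤ medium then (l, m ++ [item], h)
    else (l, m, h ++ [item])) ([], [], [])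
  s.1 ++ s.2.1 ++ s.2.2

-- ===== PORT B =====
-- port of B: three independent filters, concatenated
def rearrangeExtraSpace_alt (arr : List Int) (low : Int) (medium : Int) (high : Int) : List Int :=
  arr.filter (fun x => decide (x ≤ low))
    ++ arr.filter (fun x => decide (low < x) && decide (x ≤ medium))
    ++ arr.filter (fun x => decide (low < x) && decide (medium < x))

-- ===== PRECONDITION & SPEC =====
def Spec_rearrangeExtraSpace (arr : List Int) (low : Int) (medium : Int) (high : Int) (out : List Int) : Prop := out = rearrangeExtraSpace_alt arr low medium high
instance (arr : List Int) (low : Int) (medium : Int) (high : Int) (out : List Int) : Decidable (Spec_rearrangeExtraSpace arr low medium high out) := by unfold Spec_rearrangeExtraSpace; infer_instance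

-- ===== CLAIM (what is proved, stated in full; the proofs are below) =====
def Claim_equal_rearrangeExtraSpace : Prop := ∀ (arr : List Int) (low : Int) (medium : Int) (high : Int), Dom_rearrangeExtraSpace arr low medium high → Spec_rearrangeExtraSpace arr low medium high (rearrangeExtraSpace arr low medium high)

-- ===== LEMMAS AND PROOFS =====

-- ===== VERDICT (by name: the statement is the Claim_ definition above) =====
theorem pvLoop_eq (low medium : Int) : ∀ (arr l m h : List Int),
    arr.foldl (fun (acc : List Int × List Int × List Int) item =>
      let (l, m, h) := acc
      if item ≤ low then (l ++ [item], m, h)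
      else if item ≤ medium then (l, m ++ [item], h)
      else (l, m, h ++ [item])) (l, m, h)
    = (l ++ arr.filter (fun x => decide (x ≤ low)),
       m ++ arr.filter (fun x => decide (low < x) && decide (x ≤ medium)),
       h ++ arr.filter (fun x => decide (low < x) && decide (medium < x))) := by
  intro arr
  induction arr with
  | nil => simp
  | cons a t ih =>
    intro l m h
    simp only [List.foldl_cons, List.filter_cons]
    by_cases h1 : a ≤ low
    · have h2 : ¬ low < a := by omega
      simp [h1, h2, ih]
    · have h2 : low < a := by omega
      by_cases h3 : a ≤ medium
      · have h4 : ¬ medium < a := by omega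
        simp [h1, h2, h3, h4, ih]
      · have h4 : medium < a := by omega
        simp [h1, h2, h3, h4, ih]

theorem rearrangeExtraSpace_spec : Claim_equal_rearrangeExtraSpace := by
  intro arr low medium high _
  unfold Spec_rearrangeExtraSpace rearrangeExtraSpace rearrangeExtraSpace_alt
  simp [pvLoop_eq low medium arr [] [] []]
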